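-- pv_equiv track=rewrite | github.com/subinmun1997/my_python-for-coding-test | Programmers/solution2.py | solution
-- ===== SOURCE A (Python) =====
-- def solution(new_id):
--     answer = ''
--     user_id = ['-','_','.']
--
--     # 1단계
--     id = new_id.lower()
--
--     # 2단계
--     for i in id:
--         if i.isdigit() or i.isalpha() or i in user_id:
--             answer += i
--
--     # 3단계
--     while '..' in answer:
--         answer = answer.replace("..",'.')
--
--     # 4단계
--     if len(answer) >= 1:
--         if answer[0] == '.':
--             answer = answer[1:]
--     if len(answer) >= 1:
--         if answer[-1] == '.':
--             answer = answer[:-1]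
--
--     # 5단계
--     if len(answer) == 0:
--         answer += "a"
--
--     # 6단계
--     if len(answer) >= 16:
--         answer = answer[:15]
--         if answer[-1] == '.':
--             answer = answer[:-1]
--
--     # 7단계
--     if len(answer) <= 2:
--         while len(answer) != 3:
--             answer += answer[-1]
--     return answer
-- ===== SOURCE B (Python) =====
-- def solution(new_id):
--     # One pass fuses the character filter with the dot-run collapse (a flag
--     # remembers whether the last kept character was a dot), replacing A's
--     # append loop plus the repeated replace-until-fixpoint collapse loop.
--     chars = []
--     prev_dot = False
--     for c in new_id.lower():
--         if c.isalnum() or c in '-_.':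
--             if c == '.':
--                 if not prev_dot:
--                     chars.append('.')
--                 prev_dot = True
--             else:
--                 chars.append(c)
--                 prev_dot = False
--     answer = ''.join(chars)
--     if answer.startswith('.'):
--         answer = answer[1:]
--     if answer.endswith('.'):
--         answer = answer[:-1]
--     if len(answer) == 0:
--         answer = 'a'
--     if len(answer) >= 16:
--         answer = answer[:15]
--         if answer[-1] == '.':
--             answer = answer[:-1]
--     if len(answer) <= 2:
--         answer = answer + answer[-1] * (3 - len(answer))
--     return answer
-- ===== Notes on version B (the rewrite author's own statement) =====
-- stated objective: alternative
-- what changed: B replaces A's character-append filter loop followed by a replace-until-fixpoint loop that collapses consecutive-dot runs with a single pass that filters and collapses dot runs together using a last-kept-char-was-a-dot flag, and pads step 7 with a closed-form repeat instead of a while loop.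
import Mathlib
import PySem

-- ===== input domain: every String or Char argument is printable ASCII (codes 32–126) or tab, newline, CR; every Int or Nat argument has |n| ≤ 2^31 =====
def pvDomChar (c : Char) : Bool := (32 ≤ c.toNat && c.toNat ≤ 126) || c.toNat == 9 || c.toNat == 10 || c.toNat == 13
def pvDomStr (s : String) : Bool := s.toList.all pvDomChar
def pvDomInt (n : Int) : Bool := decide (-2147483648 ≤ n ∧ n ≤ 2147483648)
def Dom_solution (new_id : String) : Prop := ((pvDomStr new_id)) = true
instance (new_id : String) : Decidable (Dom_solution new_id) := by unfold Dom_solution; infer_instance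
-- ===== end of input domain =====

-- B fuses A's per-character filter loop and A's repeated replace-until-fixpoint dot-collapse loop into one
-- pass carrying a "last kept char was a dot" flag, and pads step 7 by a closed form
-- instead of a while loop (objective: a single pass instead of repeated rescans).

-- ===== PORT A =====
-- Characterization of Python's s.replace('..','.') for this fixed pattern; it is defined
-- above the port because collapseA's termination proof cites the length lemma below.
def replDD : List Char → List Char
  | [] => []
  | [c] => [c]
  | c :: d :: rest =>
    if c = '.' ∧ d = '.' then '.' :: replDD rest else c :: replDD (d :: rest)

theorem replDD_go_eq (fuel : Nat) (l acc : List Char) (h : l.length ≤ fuel) :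
    PySem.Chars.replace.go ['.', '.'] ['.'] fuel l acc = acc.reverse ++ replDD l := by
  induction fuel generalizing l acc with
  | zero =>
    have : l = [] := List.eq_nil_of_length_eq_zero (Nat.le_zero.mp h)
    subst this; simp [PySem.Chars.replace.go, replDD]
  | succ n ih =>
    match l with
    | [] => simp [PySem.Chars.replace.go, replDD]
    | [c] =>
      have hp : List.isPrefixOf ['.', '.'] [c] = false := by
        simp [List.isPrefixOf]
      rw [PySem.Chars.replace.go, hp]
      simp only [Bool.false_eq_true, if_false]
      rw [ih [] (c :: acc) (by simp)]
      simp [replDD]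
    | c :: d :: rest =>
      by_cases hdd : c = '.' ∧ d = '.'
      · obtain ⟨rfl, rfl⟩ := hdd
        rw [PySem.Chars.replace.go]
        have hp : List.isPrefixOf ['.', '.'] ('.' :: '.' :: rest) = true := by
          simp [List.isPrefixOf]
        rw [hp]
        simp only [if_true]
        rw [show List.drop (['.', '.'] : List Char).length ('.' :: '.' :: rest) = rest from rfl]
        rw [ih rest _ (by simp at h; omega)]
        simp [replDD]
      · rw [PySem.Chars.replace.go]
        have hp : List.isPrefixOf ['.', '.'] (c :: d :: rest) = false := by
          simp only [List.isPrefixOf, Bool.and_eq_false_iff]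
          by_cases hc : c = '.'
          · subst hc
            have hd : d ≠ '.' := fun hd => hdd ⟨rfl, hd⟩
            simp
            intro h'; exact absurd h'.symm hd
          · left; simp; intro h'; exact absurd h'.symm hc
        rw [hp]
        simp only [Bool.false_eq_true, if_false]
        rw [ih (d :: rest) (c :: acc) (by simp at h ⊢; omega)]
        rw [replDD]
        simp [hdd]

theorem replace_dd_eq (l : List Char) :
    PySem.Chars.replace l ['.', '.'] ['.'] = replDD l := by
  rw [PySem.Chars.replace]
  simp only [List.isEmpty_cons, Bool.false_eq_true, if_false]
  simpa using replDD_go_eq l.length l [] le_rfl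

theorem replDD_length_le (l : List Char) : (replDD l).length ≤ l.length := by
  induction l using replDD.induct with
  | case1 => simp [replDD]
  | case2 c => simp [replDD]
  | case3 c d rest hdd ih => simp [replDD, hdd]; omega
  | case4 c d rest hdd ih => rw [replDD, if_neg hdd]; simpa using ih

theorem replDD_length_lt (l : List Char) (h : ['.', '.'] <:+: l) :
    (replDD l).length < l.length := by
  induction l using replDD.induct with
  | case1 => simp at h
  | case2 c => have := h.length_le; simp at this
  | case3 c d rest hdd ih =>
    have := replDD_length_le rest
    simp [replDD, hdd]; omega
  | case4 c d rest hdd ih =>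
    rw [replDD, if_neg hdd]
    have h' : ['.', '.'] <:+: (d :: rest) := by
      rcases List.infix_cons_iff.mp h with h1 | h1
      · exfalso
        rcases h1 with ⟨t, ht⟩
        cases ht
        exact hdd ⟨rfl, rfl⟩
      · exact h1
    simpa using ih h'

def collapseA (l : List Char) : List Char :=
  if h : PySem.Chars.isIn ['.', '.'] l then  -- h is cited by the decreasing_by proof
    collapseA (PySem.Chars.replace l ['.', '.'] ['.'])
  else l
  termination_by l.length
  decreasing_by
    rw [replace_dd_eq]
    exact replDD_length_lt l ((PySem.Chars.isIn_iff_infix _ _).mp h)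

-- fuel 3 for step 7's while loop: it is entered only with 0 < len ≤ 2 and each pass
-- appends one char, so at most 3 passes; answer[-1] on the unreachable empty list
-- (Python would raise) is ported with default 'a'
def padA : Nat → List Char → List Char
  | 0, l => l
  | n + 1, l =>
    if l.length ≠ 3 then padA n (l ++ [(PySem.List.pyGet? l (-1)).getD 'a']) else l

def solution (new_id : String) : String :=
  let user_id : List Char := ['-', '_', '.']
  -- 1단계
  let id := (PySem.Str.lower new_id).toList
  -- 2단계
  let answer := id.foldl
    (fun acc i =>
      if PySem.Chars.isdigit i || PySem.Chars.isalpha i || user_id.contains i then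
        acc ++ [i]
      else acc) []
  -- 3단계
  let answer := collapseA answer
  -- 4단계
  let answer := if 1 ≤ answer.length then
      (if PySem.List.pyGet? answer 0 = some '.' then PySem.List.slice answer (some 1) none
       else answer)
    else answer
  let answer := if 1 ≤ answer.length then
      (if PySem.List.pyGet? answer (-1) = some '.' then PySem.List.slice answer none (some (-1))
       else answer)
    else answer
  -- 5단계
  let answer := if answer.length = 0 then answer ++ ['a'] else answer
  -- 6단계
  let answer := if 16 ≤ answer.length then
      (let t := PySem.List.slice answer none (some 15)
       if PySem.List.pyGet? t (-1) = some '.' then PySem.List.slice t none (some (-1)) else t)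
    else answer
  -- 7단계
  let answer := if answer.length ≤ 2 then padA 3 answer else answer
  String.ofList answer

-- ===== PORT B =====
def solution_alt (new_id : String) : String :=
  -- one pass: filter + collapse, state = (kept chars, last kept char was a dot)
  let st := ((PySem.Str.lower new_id).toList).foldl
    (fun st c =>
      if PySem.Chars.isalnum c || ("-_.".toList).contains c then
        (if c = '.' then (if st.2 then st else (st.1 ++ ['.'], true))
         else (st.1 ++ [c], false))
      else st) (([] : List Char), false)
  let answer := st.1
  let answer := if PySem.Chars.startswith answer ['.'] then
      PySem.List.slice answer (some 1) none
    else answer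
  let answer := if PySem.Chars.endswith answer ['.'] then
      PySem.List.slice answer none (some (-1))
    else answer
  let answer := if answer.length = 0 then ['a'] else answer
  let answer := if 16 ≤ answer.length then
      (let t := PySem.List.slice answer none (some 15)
       if PySem.List.pyGet? t (-1) = some '.' then PySem.List.slice t none (some (-1)) else t)
    else answer
  -- pad by a closed form: answer[-1] * (3 - len); default 'a' unreachable (len ≥ 1 here)
  let answer := if answer.length ≤ 2 then
      answer ++ List.replicate (3 - answer.length) ((PySem.List.pyGet? answer (-1)).getD 'a')
    else answer
  String.ofList answer

-- ===== PRECONDITION & SPEC =====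
def Spec_solution (new_id : String) (out : String) : Prop := out = solution_alt new_id
instance (new_id : String) (out : String) : Decidable (Spec_solution new_id out) := by unfold Spec_solution; infer_instance

-- ===== CLAIM (what is proved, stated in full; the proofs are below) =====
def Claim_equal_solution : Prop := ∀ (new_id : String), Dom_solution new_id → Spec_solution new_id (solution new_id)

-- ===== LEMMAS AND PROOFS =====

-- dedup of consecutive dots (the common normal form of A's collapse loop and B's pass)
def dedup (prev : Bool) : List Char → List Char
  | [] => []
  | c :: t =>
    if c = '.' then (if prev then dedup true t else '.' :: dedup true t)
    else c :: dedup false t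

theorem dedup_replDD (l : List Char) : ∀ prev, dedup prev (replDD l) = dedup prev l := by
  induction l using replDD.induct with
  | case1 => intro prev; rfl
  | case2 c => intro prev; rfl
  | case3 c d rest hdd ih =>
    obtain ⟨rfl, rfl⟩ := hdd
    intro prev
    simp only [replDD, and_self, if_pos]
    cases prev <;> simp [dedup, ih]
  | case4 c d rest hdd ih =>
    intro prev
    rw [replDD, if_neg hdd]
    by_cases hc : c = '.'
    · subst hc
      cases prev <;> simp [dedup, ih]
    · simp [dedup, hc, ih]

theorem no_dd_dedup (l : List Char) (h : ¬ ['.', '.'] <:+: l) : dedup false l = l := by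
  induction l using replDD.induct with
  | case1 => rfl
  | case2 c => by_cases hc : c = '.' <;> simp [dedup, hc]
  | case3 c d rest hdd ih =>
    obtain ⟨rfl, rfl⟩ := hdd
    exact absurd (⟨[], rest, rfl⟩ : ['.', '.'] <:+: '.' :: '.' :: rest) h
  | case4 c d rest hdd ih =>
    have h' : ¬ ['.', '.'] <:+: (d :: rest) := fun h' => h (List.infix_cons h')
    have ihd := ih h'
    by_cases hc : c = '.'
    · subst hc
      have hd : d ≠ '.' := fun hd => hdd ⟨rfl, hd⟩
      simp only [dedup, Bool.false_eq_true, if_false] at ihd ⊢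
      simp only [if_neg hd] at ihd ⊢
      simpa using ihd
    · simp only [dedup, if_neg hc] at ihd ⊢
      simpa using ihd

theorem collapseA_eq (l : List Char) : collapseA l = dedup false l := by
  induction l using collapseA.induct with
  | case1 l h ih =>
    rw [collapseA, dif_pos h, ih, replace_dd_eq, dedup_replDD]
  | case2 l h =>
    rw [collapseA, dif_neg h]
    exact (no_dd_dedup l ((PySem.Chars.isIn_eq_false_iff _ _).mp (Bool.eq_false_iff.mpr h))).symm

-- the residual flag of B's fold
def pst (prev : Bool) : List Char → Bool
  | [] => prev
  | c :: t =>
    if PySem.Chars.isalnum c || (("-_.".toList).contains c) then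
      (if c = '.' then pst true t else pst false t)
    else pst prev t

def keepB (c : Char) : Bool := PySem.Chars.isalnum c || (("-_.".toList).contains c)

theorem foldlB_eq (l : List Char) : ∀ (s : List Char) (prev : Bool),
    l.foldl (fun st c =>
      if PySem.Chars.isalnum c || (("-_.".toList).contains c) then
        (if c = '.' then (if st.2 then st else (st.1 ++ ['.'], true))
         else (st.1 ++ [c], false))
      else st) (s, prev)
    = (s ++ dedup prev (l.filter keepB), pst prev l) := by
  induction l with
  | nil => intro s prev; simp [dedup, pst]
  | cons c t ih =>
    intro s prev
    rw [List.foldl_cons, List.filter_cons]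
    show List.foldl _ (if PySem.Chars.isalnum c || (("-_.".toList).contains c) then _ else _) t = _
    by_cases hk : (PySem.Chars.isalnum c || (("-_.".toList).contains c)) = true
    · rw [if_pos hk, show keepB c = true from hk, if_pos rfl]
      by_cases hc : c = '.'
      · subst hc
        rw [if_pos rfl, dedup, if_pos rfl, pst, if_pos hk, if_pos rfl]
        cases prev with
        | true =>
          rw [if_pos (rfl : ((s, true) : List Char × Bool).2 = true), ih]
          simp
        | false =>
          rw [if_neg (by exact Bool.false_ne_true : ¬ ((s, false) : List Char × Bool).2 = true), ih]
          simp
      · rw [if_neg hc, dedup, if_neg hc, pst, if_pos hk, if_neg hc, ih]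
        simp
    · rw [if_neg hk, if_neg (show ¬ keepB c = true from hk), pst, if_neg hk, ih]

theorem keep_eq : ∀ c : Char,
    (PySem.Chars.isdigit c || PySem.Chars.isalpha c || (['-', '_', '.'] : List Char).contains c)
    = keepB c := by
  intro c
  have h : ("-_.".toList) = (['-', '_', '.'] : List Char) := rfl
  rw [keepB, h, PySem.Chars.isalnum]
  cases PySem.Chars.isdigit c <;> cases PySem.Chars.isalpha c <;> simp

theorem foldlA_eq (cs : List Char) : ∀ acc : List Char,
    cs.foldl (fun acc i =>
      if PySem.Chars.isdigit i || PySem.Chars.isalpha i || (['-', '_', '.'] : List Char).contains i then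
        acc ++ [i]
      else acc) acc
    = acc ++ cs.filter keepB := by
  induction cs with
  | nil => intro acc; simp
  | cons c t ih =>
    intro acc
    rw [List.foldl_cons, List.filter_cons]
    show List.foldl _
      (if PySem.Chars.isdigit c || PySem.Chars.isalpha c || (['-', '_', '.'] : List Char).contains c
       then _ else _) t = _
    rw [keep_eq c]
    by_cases hk : keepB c = true
    · rw [if_pos hk, if_pos hk, ih]; simp
    · rw [if_neg hk, if_neg hk, ih]

theorem step5_eq (l : List Char) :
    (if l.length = 0 then l ++ ['a'] else l) = (if l.length = 0 then ['a'] else l) := by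
  cases l <;> simp

theorem step4a_eq (l : List Char) :
    (if 1 ≤ l.length then
      (if PySem.List.pyGet? l 0 = some '.' then PySem.List.slice l (some 1) none else l)
     else l)
    = (if PySem.Chars.startswith l ['.'] then PySem.List.slice l (some 1) none else l) := by
  cases l with
  | nil => simp [PySem.Chars.startswith, List.isPrefixOf]
  | cons c t =>
    have h0 : PySem.List.pyGet? (c :: t) 0 = some c := by
      simp [PySem.List.pyGet?, PySem.List.pyIdx?]
    have hs : PySem.Chars.startswith (c :: t) ['.'] = (c == '.') := by
      simp [PySem.Chars.startswith, List.isPrefixOf, eq_comm]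
    rw [h0, hs]
    by_cases hc : c = '.' <;> simp [hc]

theorem step4b_eq (l : List Char) :
    (if 1 ≤ l.length then
      (if PySem.List.pyGet? l (-1) = some '.' then PySem.List.slice l none (some (-1)) else l)
     else l)
    = (if PySem.Chars.endswith l ['.'] then PySem.List.slice l none (some (-1)) else l) := by
  rcases l.eq_nil_or_concat with rfl | ⟨init, a, rfl⟩
  · simp [PySem.Chars.endswith, List.isSuffixOf]
  · simp only [List.concat_eq_append]
    have h0 : PySem.List.pyGet? (init ++ [a]) (-1) = some a := by
      simp only [PySem.List.pyGet?, PySem.List.pyIdx?, List.length_append, List.length_cons,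
        List.length_nil]
      norm_num
    have hs : PySem.Chars.endswith (init ++ [a]) ['.'] = (a == '.') := by
      simp [PySem.Chars.endswith, List.isSuffixOf, List.isPrefixOf, eq_comm]
    rw [h0, hs]
    by_cases hc : a = '.' <;> simp [hc]

theorem step7_eq (l : List Char) :
    (if l.length ≤ 2 then padA 3 l else l)
    = (if l.length ≤ 2 then
        l ++ List.replicate (3 - l.length) ((PySem.List.pyGet? l (-1)).getD 'a')
       else l) := by
  rcases l with _ | ⟨a, _ | ⟨b, _ | ⟨c, t⟩⟩⟩
  · norm_num [padA, PySem.List.pyGet?, PySem.List.pyIdx?, List.replicate]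
  · norm_num [padA, PySem.List.pyGet?, PySem.List.pyIdx?, List.replicate]
  · norm_num [padA, PySem.List.pyGet?, PySem.List.pyIdx?, List.replicate]
  · have h3 : ¬ (a :: b :: c :: t).length ≤ 2 := by simp
    rw [if_neg h3, if_neg h3]

-- ===== VERDICT (by name: the statement is the Claim_ definition above) =====
theorem solution_spec : Claim_equal_solution := by
  unfold Claim_equal_solution
  intro new_id _
  unfold Spec_solution solution solution_alt
  dsimp only []
  rw [foldlA_eq, foldlB_eq, collapseA_eq]
  simp only [List.nil_append]
  generalize dedup false (List.filter keepB (PySem.Str.lower new_id).toList) = l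
  rw [step4a_eq]
  generalize (if PySem.Chars.startswith l ['.'] then PySem.List.slice l (some 1) none else l) = l2
  rw [step4b_eq]
  generalize (if PySem.Chars.endswith l2 ['.'] then PySem.List.slice l2 none (some (-1)) else l2) = l3
  rw [step5_eq]
  generalize (if l3.length = 0 then ['a'] else l3) = l4
  generalize (if 16 ≤ l4.length then
      (let t := PySem.List.slice l4 none (some 15)
       if PySem.List.pyGet? t (-1) = some '.' then PySem.List.slice t none (some (-1)) else t)
    else l4) = l5
  rw [step7_eq]
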